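-- pv_equiv track=rewrite | github.com/OctaveLarose/msc_thesis_2021 | data_fetching/csmith.py | count_program_lines
-- ===== SOURCE A (Python) =====
-- def count_program_lines(program_instrs: [str]):
--     nbr_instrs = 0
--
--     for line in program_instrs:
--         if line == "/************************ statistics *************************":
--             break
--         if line == "\n":
--             continue
--         if line[0:2] == "/*" or line[0:2] == " *":
--             continue
--         nbr_instrs += 1
--
--     return nbr_instrs
-- ===== SOURCE B (Python) =====
-- STATS_MARKER = "/************************ statistics *************************"
--
--
-- def count_program_lines(program_instrs: [str]):
--     # Pass 1: truncate at the statistics sentinel (whole list if absent).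
--     try:
--         prefix = program_instrs[:program_instrs.index(STATS_MARKER)]
--     except ValueError:
--         prefix = program_instrs
--     # Pass 2: count the kept lines over that prefix.
--     return sum(1 for line in prefix
--                if line != "\n" and line[0:2] != "/*" and line[0:2] != " *")
-- ===== Notes on version B (the rewrite author's own statement) =====
-- stated objective: alternative
-- what changed: Replaces the single early-breaking counting loop by two passes: locate the statistics sentinel with list.index to truncate the list, then count kept lines with a sum over a generator.
import Mathlib
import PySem

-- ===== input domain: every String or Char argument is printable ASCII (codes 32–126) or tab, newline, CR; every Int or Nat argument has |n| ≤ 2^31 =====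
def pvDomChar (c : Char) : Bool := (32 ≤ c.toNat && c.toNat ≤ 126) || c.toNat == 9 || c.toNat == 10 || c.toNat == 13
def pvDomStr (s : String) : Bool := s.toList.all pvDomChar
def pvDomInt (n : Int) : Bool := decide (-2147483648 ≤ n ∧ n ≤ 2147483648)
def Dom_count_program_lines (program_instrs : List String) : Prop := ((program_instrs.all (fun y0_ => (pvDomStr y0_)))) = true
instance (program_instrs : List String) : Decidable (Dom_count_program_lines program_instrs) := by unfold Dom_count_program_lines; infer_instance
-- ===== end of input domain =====

-- B replaces A's single early-breaking counting loop by two passes — truncate at the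
-- statistics sentinel (via list.index), then count kept lines over that prefix — as a
-- structurally different decomposition of equal cost.

-- ===== PORT A =====
-- the statistics sentinel line
def pvStats : String := "/************************ statistics *************************"

-- A's for-loop with break/continue, as structural recursion over the list with the
-- accumulator nbr_instrs
def pvLoopA : List String → Int → Int
  | [], nbr_instrs => nbr_instrs
  | line :: rest, nbr_instrs =>
    if line = pvStats then nbr_instrs
    else if line = "\n" then pvLoopA rest nbr_instrs
    else if PySem.Str.slice line (some 0) (some 2) = "/*"
            ∨ PySem.Str.slice line (some 0) (some 2) = " *" then pvLoopA rest nbr_instrs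
    else pvLoopA rest (nbr_instrs + 1)

def count_program_lines (program_instrs : List String) : Int := pvLoopA program_instrs 0

-- ===== PORT B =====
-- B's filter condition of the generator expression
def pvKeep (line : String) : Bool :=
  line != "\n" && PySem.Str.slice line (some 0) (some 2) != "/*"
              && PySem.Str.slice line (some 0) (some 2) != " *"

-- pass 1: program_instrs[:program_instrs.index(STATS_MARKER)], whole list if absent
def pvPrefixB (program_instrs : List String) : List String :=
  match PySem.List.index? program_instrs pvStats with
  | some k => PySem.List.slice program_instrs none (some (k : Int))
  | none => program_instrs

-- pass 2: sum of 1 over the kept lines of the prefix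
def count_program_lines_alt (program_instrs : List String) : Int :=
  (((pvPrefixB program_instrs).countP pvKeep : Nat) : Int)

-- ===== PRECONDITION & SPEC =====
def Spec_count_program_lines (program_instrs : List String) (out : Int) : Prop := out = count_program_lines_alt program_instrs
instance (program_instrs : List String) (out : Int) : Decidable (Spec_count_program_lines program_instrs out) := by unfold Spec_count_program_lines; infer_instance

-- ===== CLAIM (what is proved, stated in full; the proofs are below) =====
def Claim_equal_count_program_lines : Prop := ∀ (program_instrs : List String), Dom_count_program_lines program_instrs → Spec_count_program_lines program_instrs (count_program_lines program_instrs)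

-- ===== LEMMAS AND PROOFS =====

lemma pvPrefixB_nil : pvPrefixB [] = [] := by rfl

lemma pvPrefixB_cons_stats (ls : List String) : pvPrefixB (pvStats :: ls) = [] := by
  rw [pvPrefixB, PySem.List.index?_cons_self]
  change PySem.List.slice (pvStats :: ls) none (some ((0:Nat):Int)) = []
  rw [PySem.List.slice_to_natCast, List.take_zero]

lemma pvPrefixB_cons_of_ne {l : String} (ls : List String) (h : l ≠ pvStats) :
    pvPrefixB (l :: ls) = l :: pvPrefixB ls := by
  rw [pvPrefixB, PySem.List.index?_cons_of_ne _ h]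
  cases hk : PySem.List.index? ls pvStats with
  | none => simp only [hk, Option.map_none, pvPrefixB]
  | some k =>
    simp only [pvPrefixB, hk, Option.map_some]
    rw [PySem.List.slice_to_natCast, PySem.List.slice_to_natCast, List.take_succ_cons]

lemma pvLoopA_eq (xs : List String) : ∀ n : Int,
    pvLoopA xs n = n + (((pvPrefixB xs).countP pvKeep : Nat) : Int) := by
  induction xs with
  | nil => intro n; simp [pvLoopA, pvPrefixB_nil]
  | cons l ls ih =>
    intro n
    by_cases hs : l = pvStats
    · subst hs
      rw [pvLoopA, if_pos rfl, pvPrefixB_cons_stats]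
      simp
    · rw [pvPrefixB_cons_of_ne ls hs, pvLoopA, if_neg hs]
      by_cases h1 : l = "\n"
      · have hk : pvKeep l = false := by simp [pvKeep, h1]
        rw [if_pos h1, ih n]
        simp [hk]
      · rw [if_neg h1]
        by_cases h2 : PySem.Str.slice l (some 0) (some 2) = "/*"
                ∨ PySem.Str.slice l (some 0) (some 2) = " *"
        · have hk : pvKeep l = false := by
            rcases h2 with h2 | h2 <;> simp [pvKeep, h2]
          rw [if_pos h2, ih n]
          simp [hk]
        · have h2' := h2
          push Not at h2'
          have hk : pvKeep l = true := by simp [pvKeep, h1, h2'.1, h2'.2]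
          rw [if_neg h2, ih (n + 1), List.countP_cons, hk]
          simp only [if_true]
          push_cast
          ring

-- ===== VERDICT (by name: the statement is the Claim_ definition above) =====
theorem count_program_lines_spec : Claim_equal_count_program_lines := by
  intro xs _
  unfold Spec_count_program_lines count_program_lines count_program_lines_alt
  rw [pvLoopA_eq xs 0]
  ring
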